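-- pv_equiv track=rewrite | github.com/szjasinski/uni_coding_exercises | egz_zad1.py | zdaje_zdalnie_rek
-- ===== SOURCE A (Python) =====
-- def zdaje_zdalnie_rek(A, p):
--     n = len(A)
--     if p == n:
--         return A[p-1]
--     q = zdaje_zdalnie_rek(A, p+1)
--     if A[p-1] <= q:
--         return A[p-1]
--     return q
-- ===== SOURCE B (Python) =====
-- def zdaje_zdalnie_rek(A, p):
--     q = A[len(A) - 1]
--     for i in range(len(A) - 1, p - 1, -1):
--         if A[i - 1] <= q:
--             q = A[i - 1]
--     return q
-- ===== Notes on version B (the rewrite author's own statement) =====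
-- stated objective: idiomatic
-- what changed: Replaced the deep recursion (one stack frame per suffix element) by a plain iterative running-minimum loop over a countdown range; Pre_ excludes only the inputs where A raises (empty list: IndexError; p > len(A): RecursionError; p < 1-len(A): IndexError).
import Mathlib
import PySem

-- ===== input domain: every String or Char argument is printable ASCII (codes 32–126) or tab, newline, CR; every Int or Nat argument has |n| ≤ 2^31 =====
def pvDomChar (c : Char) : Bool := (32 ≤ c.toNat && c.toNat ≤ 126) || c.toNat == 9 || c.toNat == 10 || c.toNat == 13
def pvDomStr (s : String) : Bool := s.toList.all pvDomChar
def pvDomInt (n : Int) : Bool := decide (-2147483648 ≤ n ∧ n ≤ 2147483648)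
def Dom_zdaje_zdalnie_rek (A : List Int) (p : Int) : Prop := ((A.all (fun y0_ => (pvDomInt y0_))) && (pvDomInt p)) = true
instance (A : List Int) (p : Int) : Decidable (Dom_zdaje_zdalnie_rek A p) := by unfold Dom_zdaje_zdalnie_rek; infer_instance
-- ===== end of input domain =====

-- B replaces A's deep suffix recursion by an iterative running-minimum loop (O(1) stack).

-- ===== PORT A =====
-- A recurses from p up to n = len(A); the fuel (n - p).toNat counts exactly the
-- remaining recursive calls (fuel 0 with p ≠ n is only reached where Python diverges).
def zdajeRekGo (A : List Int) (p : Int) : Nat → Int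
  | 0 =>
      if p = (A.length : Int) then (PySem.List.pyGet? A (p - 1)).getD 0
      else 0  -- Python recurses forever here (p > n); unreachable under Pre_
  | fuel + 1 =>
      if p = (A.length : Int) then (PySem.List.pyGet? A (p - 1)).getD 0
      else
        let q := zdajeRekGo A (p + 1) fuel
        match PySem.List.pyGet? A (p - 1) with
        | none => 0  -- IndexError in Python; unreachable under Pre_
        | some a => if a ≤ q then a else q

def zdaje_zdalnie_rek (A : List Int) (p : Int) : Int :=
  zdajeRekGo A p ((A.length - p).toNat)

-- ===== PORT B =====
-- q = A[len(A)-1]; for i in range(len(A)-1, p-1, -1): if A[i-1] <= q: q = A[i-1]; return q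
def zdaje_zdalnie_rek_alt (A : List Int) (p : Int) : Int :=
  let q0 := (PySem.List.pyGet? A ((A.length : Int) - 1)).getD 0  -- IndexError on empty A; outside Pre_
  (PySem.List.pyRange ((A.length : Int) - 1) (p - 1) (-1)).foldl
    (fun q i =>
      match PySem.List.pyGet? A (i - 1) with
      | none => 0  -- IndexError in Python; unreachable under Pre_
      | some a => if a ≤ q then a else q) q0

-- ===== PRECONDITION & SPEC =====
-- Pre_ excludes exactly the inputs where Python A raises: the empty list (IndexError),
-- p > len(A) (infinite recursion / RecursionError) and p < 1 - len(A) (IndexError).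
def Pre_zdaje_zdalnie_rek (A : List Int) (p : Int) : Prop :=
  A ≠ [] ∧ 1 - (A.length : Int) ≤ p ∧ p ≤ (A.length : Int)
instance (A : List Int) (p : Int) : Decidable (Pre_zdaje_zdalnie_rek A p) := by
  unfold Pre_zdaje_zdalnie_rek; infer_instance
def pvWitness_zdaje_zdalnie_rek : List Int × Int := ([3, 1, 2], 0)

def Spec_zdaje_zdalnie_rek (A : List Int) (p : Int) (out : Int) : Prop := out = zdaje_zdalnie_rek_alt A p
instance (A : List Int) (p : Int) (out : Int) : Decidable (Spec_zdaje_zdalnie_rek A p out) := by unfold Spec_zdaje_zdalnie_rek; infer_instance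

-- ===== CLAIM (what is proved, stated in full; the proofs are below) =====
def Claim_equal_zdaje_zdalnie_rek : Prop := ∀ (A : List Int) (p : Int), Dom_zdaje_zdalnie_rek A p → Pre_zdaje_zdalnie_rek A p → Spec_zdaje_zdalnie_rek A p (zdaje_zdalnie_rek A p)

-- ===== LEMMAS AND PROOFS =====

-- split the last element off a countdown range
theorem pyRange_neg_one_snoc (a b : Int) (h : b ≤ a) :
    PySem.List.pyRange a (b - 1) (-1) = PySem.List.pyRange a b (-1) ++ [b] := by
  rw [PySem.List.pyRange_neg_one_eq_reverse, PySem.List.pyRange_neg_one_eq_reverse]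
  rw [show b - 1 + 1 = b by ring]
  rw [PySem.List.pyRange_one_cons (by omega : b < a + 1)]
  simp

-- A's fuel recursion equals B's foldl, for every p ≤ len(A)
theorem go_eq_foldl (A : List Int) (p : Int) (hp : p ≤ (A.length : Int)) :
    zdajeRekGo A p ((A.length - p).toNat) = zdaje_zdalnie_rek_alt A p := by
  unfold zdaje_zdalnie_rek_alt
  obtain ⟨k, hk⟩ : ∃ k : Nat, (A.length : Int) - p = k := ⟨((A.length : Int) - p).toNat, by omega⟩
  rw [show ((A.length : Int) - p).toNat = k by omega]
  induction k generalizing p with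
  | zero =>
    have hpn : p = (A.length : Int) := by omega
    simp only [zdajeRekGo, if_pos hpn]
    rw [PySem.List.pyRange_neg_one_eq_nil (by omega : (A.length : Int) - 1 ≤ p - 1)]
    simp [hpn]
  | succ k ih =>
    have hpn : p ≠ (A.length : Int) := by omega
    simp only [zdajeRekGo, if_neg hpn]
    rw [pyRange_neg_one_snoc ((A.length : Int) - 1) p (by omega)]
    rw [List.foldl_append]
    rw [ih (p + 1) (by omega) (by omega)]
    simp

-- ===== VERDICT (by name: the statement is the Claim_ definition above) =====
theorem zdaje_zdalnie_rek_spec : Claim_equal_zdaje_zdalnie_rek := by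
  intro A p _ hPre
  unfold Spec_zdaje_zdalnie_rek zdaje_zdalnie_rek
  exact go_eq_foldl A p hPre.2.2
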